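-- pv_equiv track=rewrite | github.com/sehagler/drug_targetability | lib/output.py | _write_text_list
-- ===== SOURCE A (Python) =====
-- def _write_text_list(text_list):
--     output_text = ''
--     for i in range(len(text_list)-1):
--         text_list[i] += ','
--     for i in range(len(text_list)):
--         output_text += ' ' + text_list[i]
--         if i % 5 == 4:
--             output_text += '\n'
--         elif i == len(text_list) - 1:
--             output_text = output_text
--             output_text += '\n'
--     return output_text
-- ===== SOURCE B (Python) =====
-- def _write_text_list(text_list):
--     n = len(text_list)
--     text_list[:n-1] = [s + ',' for s in text_list[:n-1]]
--     lines = []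
--     rest = list(text_list)
--     while rest:
--         lines.append(''.join(' ' + s for s in rest[:5]))
--         rest = rest[5:]
--     return '\n'.join(lines) + ('\n' if lines else '')
-- ===== Notes on version B (the rewrite author's own statement) =====
-- stated objective: alternative
-- what changed: B replaces A's flat indexed output loop with its 'i % 5 == 4' newline test by slicing the (same, mutated-in-place) list into 5-element chunks, building one line per chunk and joining the lines with newlines.
import Mathlib
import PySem

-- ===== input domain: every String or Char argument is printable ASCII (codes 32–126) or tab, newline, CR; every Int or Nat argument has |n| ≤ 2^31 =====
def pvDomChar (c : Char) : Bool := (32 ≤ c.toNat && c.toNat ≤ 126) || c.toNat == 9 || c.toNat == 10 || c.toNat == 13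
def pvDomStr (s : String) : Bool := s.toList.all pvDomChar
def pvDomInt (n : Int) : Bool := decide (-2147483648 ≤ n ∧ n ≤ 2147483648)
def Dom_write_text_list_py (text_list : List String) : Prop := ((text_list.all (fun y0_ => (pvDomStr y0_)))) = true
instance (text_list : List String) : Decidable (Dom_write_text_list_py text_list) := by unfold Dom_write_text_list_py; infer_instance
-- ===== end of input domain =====

-- B rebuilds the output by slicing the list into 5-element chunks and joining the chunk
-- lines with '\n', replacing A's flat indexed loop with its 'i % 5 == 4' newline test;
-- objective: alternative decomposition (equivalence is about the RETURN value; B's Python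
-- performs the same in-place ','-append mutation of text_list as A).

-- ===== PORT A =====
def write_text_list_py (text_list : List String) : String :=
  -- for i in range(len(text_list)-1): text_list[i] += ','   (i is always a valid index)
  let tl := (PySem.List.pyRange 0 ((text_list.length : Int) - 1) 1).foldl
    (fun l i => l.set i.toNat (PySem.List.pyGetD l i "" ++ ",")) text_list
  -- for i in range(len(text_list)): output_text += ' ' + text_list[i]; …
  (PySem.List.pyRange 0 ((tl.length : Int)) 1).foldl
    (fun output_text i =>
      let output_text := output_text ++ (" " ++ PySem.List.pyGetD tl i "")
      if PySem.Int.mod i 5 == 4 then output_text ++ "\n"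
      else if i == (tl.length : Int) - 1 then output_text ++ "\n"
      else output_text) ""

-- ===== PORT B =====
-- while rest: lines.append(''.join(' ' + s for s in rest[:5])); rest = rest[5:]
-- (rest[:5] / rest[5:] with literal nonnegative bounds are exactly take 5 / drop 5)
def pvLines : List String → List String
  | [] => []
  | x :: xs =>
      PySem.Str.join "" (((x :: xs).take 5).map (fun s => " " ++ s)) :: pvLines (xs.drop 4)
termination_by r => r.length
decreasing_by simp

def write_text_list_py_alt (text_list : List String) : String :=
  let n := text_list.length
  -- text_list[:n-1] = [s + ',' for s in text_list[:n-1]]  (slice with bound n-1; for n = 0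
  -- Python's bound -1 also selects nothing, so take (n-1) on Nat is exact)
  let tl := (text_list.take (n - 1)).map (fun s => s ++ ",") ++ text_list.drop (n - 1)
  let lines := pvLines tl
  PySem.Str.join "\n" lines ++ (if lines.isEmpty then "" else "\n")

-- ===== PRECONDITION & SPEC =====
def Spec_write_text_list_py (text_list : List String) (out : String) : Prop := out = write_text_list_py_alt text_list
instance (text_list : List String) (out : String) : Decidable (Spec_write_text_list_py text_list out) := by unfold Spec_write_text_list_py; infer_instance

-- ===== CLAIM (what is proved, stated in full; the proofs are below) =====
def Claim_equal_write_text_list_py : Prop := ∀ (text_list : List String), Dom_write_text_list_py text_list → Spec_write_text_list_py text_list (write_text_list_py text_list)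

-- ===== LEMMAS AND PROOFS =====

-- concatenation of a list of strings (right-nested); the common normal form of both sides
def pvCat : List String → String
  | [] => ""
  | s :: ss => s ++ pvCat ss

-- what one iteration of A's output loop appends
def pvPiece (tl : List String) (i : Int) : String :=
  if PySem.Int.mod i 5 == 4 then (" " ++ PySem.List.pyGetD tl i "") ++ "\n"
  else if i == (tl.length : Int) - 1 then (" " ++ PySem.List.pyGetD tl i "") ++ "\n"
  else " " ++ PySem.List.pyGetD tl i ""

theorem pvCat_append (a b : List String) : pvCat (a ++ b) = pvCat a ++ pvCat b := by
  induction a with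
  | nil => simp [pvCat]
  | cons s ss ih => simp [pvCat, ih, String.append_assoc]

theorem strjoin_nil (sep : String) : PySem.Str.join sep [] = "" := by
  apply String.toList_injective; simp [PySem.Chars.join_nil]

theorem strjoin_singleton (sep : String) (a : String) : PySem.Str.join sep [a] = a := by
  apply String.toList_injective; simp [PySem.Chars.join_singleton]

theorem strjoin_cons_cons (sep a b : String) (r : List String) :
    PySem.Str.join sep (a :: b :: r) = a ++ (sep ++ PySem.Str.join sep (b :: r)) := by
  apply String.toList_injective; simp [PySem.Chars.join_cons_cons]

theorem strjoin_empty_sep (l : List String) : PySem.Str.join "" l = pvCat l := by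
  induction l with
  | nil => simp [strjoin_nil, pvCat]
  | cons a r ih =>
      cases r with
      | nil => simp [strjoin_singleton, pvCat, String.append_empty]
      | cons b r' =>
          rw [strjoin_cons_cons, ih]
          simp [pvCat, String.empty_append]

-- A's output loop, with any accumulator, appends the concatenation of the pieces
theorem loopA_eq (tl : List String) (is : List Int) (acc : String) :
    is.foldl
      (fun output_text i =>
        let output_text := output_text ++ (" " ++ PySem.List.pyGetD tl i "")
        if PySem.Int.mod i 5 == 4 then output_text ++ "\n"
        else if i == (tl.length : Int) - 1 then output_text ++ "\n"
        else output_text) acc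
    = acc ++ pvCat (is.map (pvPiece tl)) := by
  induction is generalizing acc with
  | nil => simp [pvCat]
  | cons i is ih =>
      simp only [List.foldl_cons, List.map_cons, pvCat, ih, pvPiece]
      split_ifs <;> simp [String.append_assoc]

-- A's mutation loop: processing indices 0..k-1 maps ',' onto the first k elements
theorem mut_gen (l : List String) (k : Nat) (hk : k ≤ l.length) :
    (PySem.List.pyRange 0 (k : Int) 1).foldl
      (fun acc i => acc.set i.toNat (PySem.List.pyGetD acc i "" ++ ",")) l
    = (l.take k).map (fun s => s ++ ",") ++ l.drop k := by
  induction k with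
  | zero =>
      rw [show ((0:Nat):Int) = 0 by simp, PySem.List.pyRange_one_eq_nil le_rfl]
      simp
  | succ k ih =>
      have hkl : k < l.length := by omega
      have hc : ((k+1 : Nat) : Int) = (k:Int) + 1 := by push_cast; ring
      rw [hc, PySem.List.pyRange_one_succ_right (by omega)]
      rw [List.foldl_append, ih (by omega)]
      simp only [List.foldl_cons, List.foldl_nil]
      have hA : ((l.take k).map (fun s => s ++ ",")).length = k := by
        simp; omega
      rw [List.drop_eq_getElem_cons hkl]
      have hget : PySem.List.pyGetD
          ((l.take k).map (fun s => s ++ ",") ++ (l[k] :: l.drop (k+1))) ((k:Int)) ""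
          = l[k] := by
        rw [PySem.List.pyGetD_natCast, List.getD_eq_getElem?_getD,
          List.getElem?_append_right (by omega), hA]
        simp [List.getElem?_eq_getElem hkl]
      rw [hget, Int.toNat_natCast, List.set_append, if_neg (by omega), hA, Nat.sub_self,
        List.set_cons_zero]
      have htake : List.map (fun s => s ++ ",") (List.take (k+1) l)
          = List.map (fun s => s ++ ",") (List.take k l) ++ [l[k] ++ ","] := by
        rw [List.map_take, List.map_take, List.take_succ]
        congr 1
        rw [List.getElem?_map, List.getElem?_eq_getElem hkl]
        rfl
      rw [htake, List.append_cons]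

theorem mutA_eq (l : List String) :
    (PySem.List.pyRange 0 ((l.length : Int) - 1) 1).foldl
      (fun acc i => acc.set i.toNat (PySem.List.pyGetD acc i "" ++ ",")) l
    = (l.take (l.length - 1)).map (fun s => s ++ ",") ++ l.drop (l.length - 1) := by
  cases l with
  | nil => rw [PySem.List.pyRange_one_eq_nil (by norm_num)]; simp
  | cons x xs =>
      have hc : (((x :: xs).length : Int) - 1) = (((x :: xs).length - 1 : Nat) : Int) := by
        simp
      rw [hc, mut_gen _ _ (by omega)]

-- the pieces at indices 5,…,n-1 are the pieces of the list with its first chunk dropped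
theorem pvPiece_shift (tl : List String) (h : 5 ≤ tl.length) :
    (PySem.List.pyRange 5 ((tl.length : Int)) 1).map (pvPiece tl)
    = (PySem.List.pyRange 0 (((tl.drop 5).length : Int)) 1).map (pvPiece (tl.drop 5)) := by
  rw [PySem.List.pyRange_one, PySem.List.pyRange_one]
  have hm : ((tl.length : Int) - 5).toNat = (((tl.drop 5).length : Int) - 0).toNat := by
    simp; omega
  rw [hm]
  simp only [List.map_map]
  apply List.map_congr_left
  intro k hk
  have hk' : k < tl.length - 5 := by
    simpa using (by simpa using List.mem_range.mp hk : k < (((tl.drop 5).length : Int) - 0).toNat)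
  simp only [Function.comp]
  have hmod : PySem.Int.mod (5 + (k:Int)) 5 = PySem.Int.mod (0 + (k:Int)) 5 := by
    rw [PySem.Int.mod_eq_emod_of_pos (by norm_num), PySem.Int.mod_eq_emod_of_pos (by norm_num)]
    omega
  have hidx : PySem.List.pyGetD tl (5 + (k:Int)) "" = PySem.List.pyGetD (tl.drop 5) (0 + (k:Int)) "" := by
    have h5k : (5 + (k:Int)) = ((5 + k : Nat) : Int) := by push_cast; ring
    have h0k : (0 + (k:Int)) = ((k : Nat) : Int) := by ring
    rw [h5k, h0k, PySem.List.pyGetD_natCast, PySem.List.pyGetD_natCast]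
    rw [List.getD_eq_getElem?_getD, List.getD_eq_getElem?_getD, List.getElem?_drop]
  have hcond : ((5 + (k:Int)) == (tl.length : Int) - 1)
      = ((0 + (k:Int)) == ((tl.drop 5).length : Int) - 1) := by
    by_cases h' : (5 + (k:Int)) = (tl.length : Int) - 1 <;>
      simp [h', List.length_drop] <;> omega
  unfold pvPiece
  rw [hmod, hidx, hcond]

-- the heart: A's flat loop output equals B's chunked output, for every list
theorem loop_main (tl : List String) :
    pvCat ((PySem.List.pyRange 0 ((tl.length : Int)) 1).map (pvPiece tl))
    = PySem.Str.join "\n" (pvLines tl) ++ (if (pvLines tl).isEmpty then "" else "\n") := by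
  induction tl using pvLines.induct with
  | case1 =>
      rw [show ((([] : List String).length : Int)) = 0 by simp,
        PySem.List.pyRange_one_eq_nil le_rfl]
      simp [pvLines, pvCat, strjoin_nil]
  | case2 x xs ih =>
      rcases xs with _ | ⟨a, _ | ⟨b, _ | ⟨c, _ | ⟨d, _ | ⟨e, rest⟩⟩⟩⟩⟩
      · -- n = 1
        have h01 : PySem.List.pyRange 0 1 1 = [0] := by decide
        simp only [List.length_cons, List.length_nil, Nat.cast_one, Nat.zero_add, h01]
        simp [pvLines, pvPiece, pvCat, strjoin_singleton,
          PySem.List.pyGetD_ofNat', String.append_assoc, String.append_empty]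
      · -- n = 2
        have hr : PySem.List.pyRange 0 2 1 = [0,1] := by decide
        have hl : (((x :: a :: [] : List String)).length : Int) = 2 := by simp
        rw [hl, hr]
        simp [pvLines, pvPiece, pvCat, strjoin_empty_sep, strjoin_singleton,
          PySem.List.pyGetD_ofNat', String.append_assoc, String.append_empty]
      · -- n = 3
        have hr : PySem.List.pyRange 0 3 1 = [0,1,2] := by decide
        have hl : (((x :: a :: b :: [] : List String)).length : Int) = 3 := by simp
        rw [hl, hr]
        simp [pvLines, pvPiece, pvCat, strjoin_empty_sep, strjoin_singleton,
          PySem.List.pyGetD_ofNat', String.append_assoc, String.append_empty]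
      · -- n = 4
        have hr : PySem.List.pyRange 0 4 1 = [0,1,2,3] := by decide
        have hl : (((x :: a :: b :: c :: [] : List String)).length : Int) = 4 := by simp
        rw [hl, hr]
        simp [pvLines, pvPiece, pvCat, strjoin_empty_sep, strjoin_singleton,
          PySem.List.pyGetD_ofNat', String.append_assoc, String.append_empty]
      · -- n = 5
        have hr : PySem.List.pyRange 0 5 1 = [0,1,2,3,4] := by decide
        have hl : (((x :: a :: b :: c :: d :: [] : List String)).length : Int) = 5 := by simp
        rw [hl, hr]
        simp [pvLines, pvPiece, pvCat, strjoin_empty_sep, strjoin_singleton,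
          PySem.List.pyGetD_ofNat', String.append_assoc, String.append_empty]
      · -- n ≥ 6 : first chunk [x,a,b,c,d], remainder e :: rest
        have hdrop4 : ((a :: b :: c :: d :: e :: rest : List String).drop 4) = e :: rest := rfl
        rw [hdrop4] at ih
        have hLines : pvLines (x :: a :: b :: c :: d :: e :: rest)
            = PySem.Str.join "" (([x, a, b, c, d] : List String).map (fun s => " " ++ s))
              :: pvLines (e :: rest) := by
          rw [pvLines]; rfl
        have hLT : ∃ L T, pvLines (e :: rest) = L :: T := by
          rw [pvLines]; exact ⟨_, _, rfl⟩
        obtain ⟨L, T, hLT⟩ := hLT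
        have h5n : (5:Int) ≤ (((x :: a :: b :: c :: d :: e :: rest : List String)).length : Int) := by
          simp only [List.length_cons]; omega
        rw [PySem.List.pyRange_one_append 0 5 _ (by norm_num) h5n, List.map_append, pvCat_append,
          pvPiece_shift _ (by simp only [List.length_cons]; omega),
          show ((x :: a :: b :: c :: d :: e :: rest : List String).drop 5) = e :: rest from rfl, ih]
        rw [hLines, hLT, strjoin_cons_cons]
        have h05 : PySem.List.pyRange 0 5 1 = [0, 1, 2, 3, 4] := by decide
        rw [h05]
        simp [pvPiece, pvCat, strjoin_empty_sep, PySem.List.pyGetD_ofNat',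
          String.append_assoc, String.append_empty]
        split_ifs <;> try omega
        try simp [String.append_assoc]

-- ===== VERDICT (by name: the statement is the Claim_ definition above) =====
theorem write_text_list_py_spec : Claim_equal_write_text_list_py := by
  intro text_list _
  unfold Spec_write_text_list_py write_text_list_py write_text_list_py_alt
  rw [mutA_eq, loopA_eq]
  rw [String.empty_append]
  exact loop_main _
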